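-- pv_equiv track=rewrite | github.com/La-BeTe/dsa | udemy-dsa-solutions/average_pair.py | average_pair
-- ===== SOURCE A (Python) =====
-- def average_pair(l1, average):
--     sum_to_search_for = average * 2
--     left, right = 0, len(l1) -1
--     while left < right:
--         sum_of_left_and_right = l1[left] + l1[right]
--         if sum_of_left_and_right == sum_to_search_for:
--             return True
--         elif sum_of_left_and_right < sum_to_search_for:
--             left += 1
--         else:
--             right -= 1
--     return False
-- ===== SOURCE B (Python) =====
-- def average_pair(l1, average):
--     target = average * 2
--     seen = set()
--     for x in l1:
--         if target - x in seen:
--             return True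
--         seen.add(x)
--     return False
-- ===== Notes on version B (the rewrite author's own statement) =====
-- stated objective: idiomatic
-- what changed: Replaces the two converging pointers over the sorted array with a single forward pass keeping a hash set of already-seen values and testing each element's complement against it; Pre_ excludes unsorted lists containing a matching pair, where the two-pointer's answer depends accidentally on element order.
-- outside the precondition, e.g. on average_pair([5, 0, 3, 1], 2): A returns False, B returns True
import Mathlib
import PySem

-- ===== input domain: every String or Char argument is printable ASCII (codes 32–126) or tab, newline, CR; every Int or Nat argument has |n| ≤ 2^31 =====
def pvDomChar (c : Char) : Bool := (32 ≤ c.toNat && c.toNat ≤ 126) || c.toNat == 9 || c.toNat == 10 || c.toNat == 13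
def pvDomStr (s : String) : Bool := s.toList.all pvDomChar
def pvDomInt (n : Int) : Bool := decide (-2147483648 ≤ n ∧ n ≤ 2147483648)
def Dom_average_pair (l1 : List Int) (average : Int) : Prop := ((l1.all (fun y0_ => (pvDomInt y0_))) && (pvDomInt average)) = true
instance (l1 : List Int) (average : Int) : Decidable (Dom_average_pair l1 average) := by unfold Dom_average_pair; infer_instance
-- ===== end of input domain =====

-- B replaces A's two converging pointers over the sorted array with one forward pass and a set of seen values (idiomatic; same cost).

-- ===== PORT A =====
-- while left < right: the indices stay inside 0 ≤ left < right ≤ len-1, so Python's l1[left]/l1[right]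
-- never raise; they are ported as List.getD (exact in that range).
def apLoop (l1 : List Int) (target : Int) (left right : Nat) : Bool :=
  if left < right then
    if l1.getD left 0 + l1.getD right 0 = target then true
    else if l1.getD left 0 + l1.getD right 0 < target then apLoop l1 target (left + 1) right
    else apLoop l1 target left (right - 1)
  else false
termination_by right - left
decreasing_by all_goals omega

def average_pair (l1 : List Int) (average : Int) : Bool :=
  apLoop l1 (average * 2) 0 (l1.length - 1)

-- ===== PORT B =====
def apSeen (target : Int) : List Int → PySem.Set Int → Bool
  | [], _ => false
  | x :: xs, seen =>
    if seen.contains (target - x) then true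
    else apSeen target xs (seen.add x)

def average_pair_alt (l1 : List Int) (average : Int) : Bool :=
  apSeen (average * 2) l1 PySem.Set.empty

-- ===== PRECONDITION & SPEC =====
-- A is the textbook two-pointer scan whose contract assumes a non-decreasingly sorted array (the task:
-- "check if a pair averages to target in SORTED array"); Pre_ excludes only unsorted lists that contain
-- a pair summing to 2*average, where A's pointer walk may or may not stumble on the pair depending on
-- element order while B's set scan always finds it; on every other input (sorted, or no pair at all)
-- the two agree and the claim covers it.
def Pre_average_pair (l1 : List Int) (average : Int) : Prop :=
  l1.Pairwise (· ≤ ·) ∨ l1.Pairwise (fun a b => a + b ≠ average * 2)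
instance (l1 : List Int) (average : Int) : Decidable (Pre_average_pair l1 average) := by
  unfold Pre_average_pair; infer_instance

def pvWitness_average_pair : List Int × Int := ([1, 2, 3], 2)

def Spec_average_pair (l1 : List Int) (average : Int) (out : Bool) : Prop := out = average_pair_alt l1 average
instance (l1 : List Int) (average : Int) (out : Bool) : Decidable (Spec_average_pair l1 average out) := by unfold Spec_average_pair; infer_instance

-- ===== CLAIM (what is proved, stated in full; the proofs are below) =====
def Claim_equal_average_pair : Prop := ∀ (l1 : List Int) (average : Int), Dom_average_pair l1 average → Pre_average_pair l1 average → Spec_average_pair l1 average (average_pair l1 average)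

-- ===== LEMMAS AND PROOFS =====

-- The common characterisation: some pair of positions i < j sums to the target.
def PairSum (l1 : List Int) (t : Int) : Prop :=
  ∃ i j, i < j ∧ j < l1.length ∧ l1.getD i 0 + l1.getD j 0 = t

-- sortedness gives monotone entries
theorem getD_mono (l1 : List Int) (hs : l1.Pairwise (· ≤ ·)) {i j : Nat}
    (hij : i ≤ j) (hj : j < l1.length) : l1.getD i 0 ≤ l1.getD j 0 := by
  rcases Nat.lt_or_ge i j with h | h
  · have := (List.pairwise_iff_getElem.mp hs) i j (by omega) hj h
    simpa [List.getD_eq_getElem?_getD, List.getElem?_eq_getElem, hj, show i < l1.length by omega]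
      using this
  · have : i = j := by omega
    subst this; rfl

-- A's loop finds a pair inside [left, right] iff one exists there (needs sortedness)
theorem apLoop_iff (l1 : List Int) (t : Int) (hs : l1.Pairwise (· ≤ ·)) :
    ∀ left right, right < l1.length →
      (apLoop l1 t left right = true ↔
        ∃ i j, left ≤ i ∧ i < j ∧ j ≤ right ∧ l1.getD i 0 + l1.getD j 0 = t) := by
  intro left right
  induction left, right using apLoop.induct l1 t with
  | case1 left right hlt hst =>
    intro hr
    rw [show apLoop l1 t left right = true by
      rw [apLoop, if_pos hlt, if_pos hst]]
    constructor
    · intro _; exact ⟨left, right, le_refl _, hlt, le_refl _, hst⟩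
    · intro _; rfl
  | case2 left right hlt hne hlt2 ih =>
    intro hr
    rw [show apLoop l1 t left right = apLoop l1 t (left + 1) right by
      rw [apLoop, if_pos hlt, if_neg hne, if_pos hlt2]]
    rw [ih hr]
    constructor
    · rintro ⟨i, j, h1, h2, h3, h4⟩; exact ⟨i, j, by omega, h2, h3, h4⟩
    · rintro ⟨i, j, h1, h2, h3, h4⟩
      refine ⟨i, j, ?_, h2, h3, h4⟩
      by_contra hcon
      have hi : i = left := by omega
      subst hi
      have : l1.getD j 0 ≤ l1.getD right 0 := getD_mono l1 hs h3 hr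
      omega
  | case3 left right hlt hne hge ih =>
    intro hr
    rw [show apLoop l1 t left right = apLoop l1 t left (right - 1) by
      rw [apLoop, if_pos hlt, if_neg hne, if_neg hge]]
    rw [ih (by omega)]
    constructor
    · rintro ⟨i, j, h1, h2, h3, h4⟩; exact ⟨i, j, h1, h2, by omega, h4⟩
    · rintro ⟨i, j, h1, h2, h3, h4⟩
      refine ⟨i, j, h1, h2, ?_, h4⟩
      by_contra hcon
      have hj : j = right := by omega
      subst hj
      have : l1.getD left 0 ≤ l1.getD i 0 := getD_mono l1 hs h1 (by omega)
      omega
  | case4 left right hge =>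
    intro hr
    rw [apLoop, if_neg hge]
    constructor
    · intro h; cases h
    · rintro ⟨i, j, h1, h2, h3, _⟩; omega

theorem average_pair_iff (l1 : List Int) (average : Int) (hs : l1.Pairwise (· ≤ ·)) :
    average_pair l1 average = true ↔ PairSum l1 (average * 2) := by
  unfold average_pair PairSum
  cases l1 with
  | nil =>
    simp only [List.length_nil]
    rw [apLoop, if_neg (by omega)]
    constructor
    · intro h; cases h
    · rintro ⟨i, j, h1, h2, _⟩; omega
  | cons x xs =>
    rw [apLoop_iff (x :: xs) (average * 2) hs 0 ((x :: xs).length - 1)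
      (by simp [List.length_cons])]
    constructor
    · rintro ⟨i, j, _, h2, h3, h4⟩
      exact ⟨i, j, h2, by simp [List.length_cons] at h3 ⊢; omega, h4⟩
    · rintro ⟨i, j, h2, h3, h4⟩
      exact ⟨i, j, Nat.zero_le _, h2, by simp [List.length_cons] at h3 ⊢; omega, h4⟩

-- membership in a prefix = an earlier index with that value
theorem mem_take_iff (xs : List Int) (j : Nat) (hj : j < xs.length) (y : Int) :
    y ∈ xs.take j ↔ ∃ i, i < j ∧ xs.getD i 0 = y := by
  constructor
  · intro h
    obtain ⟨i, hi, hval⟩ := List.getElem_of_mem h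
    have hlen : i < j := by
      have := hi; rw [List.length_take] at this; omega
    refine ⟨i, hlen, ?_⟩
    rw [List.getElem_take] at hval
    rw [List.getD_eq_getElem?_getD, List.getElem?_eq_getElem (by omega)]
    simpa using hval
  · rintro ⟨i, hi, hval⟩
    have hil : i < xs.length := by omega
    have : xs[i] = y := by
      rw [List.getD_eq_getElem?_getD, List.getElem?_eq_getElem hil] at hval
      simpa using hval
    subst this
    have hlt2 : i < (xs.take j).length := by rw [List.length_take]; omega
    have hmem := List.getElem_mem hlt2
    rwa [List.getElem_take] at hmem

-- B's loop, with the already-seen values generalised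
theorem apSeen_iff (t : Int) : ∀ (xs : List Int) (seen : PySem.Set Int),
    (apSeen t xs seen = true ↔
      ∃ j, j < xs.length ∧ (t - xs.getD j 0) ∈ (seen ++ xs.take j)) := by
  intro xs
  induction xs with
  | nil => intro seen; simp [apSeen]
  | cons x xs ih =>
    intro seen
    rw [apSeen]
    by_cases hc : seen.contains (t - x) = true
    · rw [if_pos hc]
      simp only [true_iff]
      refine ⟨0, by simp, ?_⟩
      simp only [List.take_zero, List.append_nil, List.getD_cons_zero]
      simpa [PySem.Set.contains, List.contains_iff_mem] using hc
    · rw [if_neg hc]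
      rw [ih (seen.add x)]
      have hcm : (t - x) ∉ seen := by
        simpa [PySem.Set.contains, List.contains_iff_mem] using hc
      constructor
      · rintro ⟨j, hj, hm⟩
        refine ⟨j + 1, by simpa using Nat.succ_lt_succ hj, ?_⟩
        simp only [List.getD_cons_succ, List.take_succ_cons]
        rw [List.mem_append] at hm ⊢
        rcases hm with h | h
        · rcases (PySem.Set.mem_add _ _ _).mp h with h' | h'
          · exact Or.inl h'
          · exact Or.inr (List.mem_cons.mpr (Or.inl (by simpa using h')))
        · exact Or.inr (List.mem_cons.mpr (Or.inr (by simpa using h)))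
      · rintro ⟨j, hj, hm⟩
        cases j with
        | zero =>
          exfalso
          simp only [List.take_zero, List.append_nil, List.getD_cons_zero] at hm
          exact hcm hm
        | succ j =>
          refine ⟨j, by simpa using hj, ?_⟩
          simp only [List.getD_cons_succ, List.take_succ_cons] at hm
          rw [List.mem_append] at hm ⊢
          rcases hm with h | h
          · exact Or.inl ((PySem.Set.mem_add _ _ _).mpr (Or.inl h))
          · rcases List.mem_cons.mp h with h' | h'
            · exact Or.inl ((PySem.Set.mem_add _ _ _).mpr (Or.inr h'))
            · exact Or.inr h'

theorem average_pair_alt_iff (l1 : List Int) (average : Int) :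
    average_pair_alt l1 average = true ↔ PairSum l1 (average * 2) := by
  unfold average_pair_alt PairSum
  rw [apSeen_iff]
  constructor
  · rintro ⟨j, hj, hm⟩
    simp only [PySem.Set.empty, List.nil_append] at hm
    obtain ⟨i, hi, hval⟩ := (mem_take_iff l1 j hj _).mp hm
    exact ⟨i, j, hi, hj, by omega⟩
  · rintro ⟨i, j, hij, hj, hsum⟩
    refine ⟨j, hj, ?_⟩
    simp only [PySem.Set.empty, List.nil_append]
    exact (mem_take_iff l1 j hj _).mpr ⟨i, hij, by omega⟩

-- A's loop is sound on ANY list: if it answers true it did see a pair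
theorem apLoop_sound (l1 : List Int) (t : Int) :
    ∀ left right, right < l1.length → apLoop l1 t left right = true → PairSum l1 t := by
  intro left right
  induction left, right using apLoop.induct l1 t with
  | case1 left right hlt hst =>
    intro hr _; exact ⟨left, right, hlt, hr, hst⟩
  | case2 left right hlt hne hlt2 ih =>
    intro hr h
    refine ih hr ?_
    rwa [apLoop, if_pos hlt, if_neg hne, if_pos hlt2] at h
  | case3 left right hlt hne hge ih =>
    intro hr h
    refine ih (by omega) ?_
    rwa [apLoop, if_pos hlt, if_neg hne, if_neg hge] at h
  | case4 left right hge =>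
    intro _ h
    rw [apLoop, if_neg hge] at h
    cases h

theorem average_pair_sound (l1 : List Int) (average : Int) :
    average_pair l1 average = true → PairSum l1 (average * 2) := by
  unfold average_pair
  cases l1 with
  | nil => intro h; rw [apLoop, if_neg (by simp)] at h; cases h
  | cons x xs => exact apLoop_sound _ _ 0 _ (by simp [List.length_cons])

-- a list pairwise free of target sums admits no pair
theorem no_pair_of_pairwise (l1 : List Int) (t : Int)
    (h : l1.Pairwise (fun a b => a + b ≠ t)) : ¬ PairSum l1 t := by
  rintro ⟨i, j, hij, hj, hsum⟩
  have hi : i < l1.length := by omega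
  have := (List.pairwise_iff_getElem.mp h) i j hi hj hij
  apply this
  rw [List.getD_eq_getElem?_getD, List.getElem?_eq_getElem hi,
      List.getD_eq_getElem?_getD, List.getElem?_eq_getElem hj] at hsum
  simpa using hsum

-- ===== VERDICT (by name: the statement is the Claim_ definition above) =====
theorem average_pair_spec : Claim_equal_average_pair := by
  intro l1 average _ hpre
  unfold Spec_average_pair
  have h2 := average_pair_alt_iff l1 average
  rcases hpre with hs | hnp
  · have h1 := average_pair_iff l1 average hs
    cases ha : average_pair l1 average
    · cases hb : average_pair_alt l1 average
      · rfl
      · exact absurd (h1.mpr (h2.mp hb)) (by simp [ha])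
    · exact (h2.mpr (h1.mp ha)).symm
  · have hnps := no_pair_of_pairwise l1 (average * 2) hnp
    cases ha : average_pair l1 average
    · cases hb : average_pair_alt l1 average
      · rfl
      · exact absurd (h2.mp hb) hnps
    · exact absurd (average_pair_sound l1 average ha) hnps
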